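-- pv_equiv track=rewrite | github.com/AidenLong/rgzn | workspace/python-base/com/me/day2/work.py | revert
-- ===== SOURCE A (Python) =====
-- def revert(s):
--     list1 = s.split(" ")
--     tmp = ''
--     for i in list1:
--         if len(i) > 0:
--             tmp += i[::-1]
--             tmp += ' '
--         else:
--             tmp += ' '
--     return tmp[-2::-1]
-- ===== SOURCE B (Python) =====
-- def revert(s):
--     return " ".join(s.split(" ")[::-1])
-- ===== Notes on version B (the rewrite author's own statement) =====
-- stated objective: simpler
-- what changed: B reverses the list of space-split tokens and rejoins them, replacing A's per-word character reversal + whole-string reversal trick and its character-accumulating loop with a single split/reverse/join.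
import Mathlib
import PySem

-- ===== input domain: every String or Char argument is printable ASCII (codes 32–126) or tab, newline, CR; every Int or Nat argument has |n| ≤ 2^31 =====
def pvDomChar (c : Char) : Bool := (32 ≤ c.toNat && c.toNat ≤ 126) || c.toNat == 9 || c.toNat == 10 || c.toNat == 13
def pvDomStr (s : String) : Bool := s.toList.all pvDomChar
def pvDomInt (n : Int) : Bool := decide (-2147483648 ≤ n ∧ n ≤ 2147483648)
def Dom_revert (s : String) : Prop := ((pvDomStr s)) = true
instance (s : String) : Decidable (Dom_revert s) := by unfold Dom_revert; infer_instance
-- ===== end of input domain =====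

-- B replaces A's per-word character reversal + whole-string reversal trick by a plain
-- split / reverse the token list / join, for simplicity (return value proved equal on all inputs).


-- ===== PORT A =====
-- literal port of A; the two slice? calls have step -1 ≠ 0, so they are always `some`
-- and `.getD []` is exact (never reached as the default).
def revert (s : String) : String :=
  let list1 := PySem.Chars.splitOn s.toList [' ']
  let tmp := list1.foldl (fun tmp i =>
    if 0 < i.length then
      tmp ++ (PySem.List.slice? i none none (-1)).getD [] ++ [' ']
    else
      tmp ++ [' ']) []
  String.ofList ((PySem.List.slice? tmp (some (-2)) none (-1)).getD [])

-- ===== PORT B =====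
def revert_alt (s : String) : String :=
  String.ofList (PySem.Chars.join [' '] (PySem.Chars.splitOn s.toList [' ']).reverse)

-- ===== PRECONDITION & SPEC =====
def Spec_revert (s : String) (out : String) : Prop := out = revert_alt s
instance (s : String) (out : String) : Decidable (Spec_revert s out) := by unfold Spec_revert; infer_instance

-- ===== CLAIM (what is proved, stated in full; the proofs are below) =====
def Claim_equal_revert : Prop := ∀ (s : String), Dom_revert s → Spec_revert s (revert s)

-- ===== LEMMAS AND PROOFS =====

-- a backward index scan by filterMap is the reversed take
theorem fm_rev {α : Type} (xs : List α) : ∀ (m : Nat), m ≤ xs.length →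
    List.filterMap (fun k : Nat => xs[((m:Int) - 1 + -(k:Int)).toNat]?) (List.range m)
      = (xs.take m).reverse := by
  intro m
  induction m with
  | zero => simp
  | succ n ih =>
    intro h
    rw [List.range_succ_eq_map]
    rw [List.filterMap_cons]
    have hget : xs[(((n+1:Nat):Int) - 1 + -((0:Nat):Int)).toNat]? = some (xs[n]'(by omega)) := by
      rw [show (((n+1:Nat):Int) - 1 + -((0:Nat):Int)).toNat = n by push_cast; omega]
      exact List.getElem?_eq_getElem (by omega)
    rw [List.filterMap_map]
    have hfun : (fun k : Nat => xs[(((n+1:Nat):Int) - 1 + -(k:Int)).toNat]?) ∘ Nat.succ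
        = fun k : Nat => xs[((n:Int) - 1 + -(k:Int)).toNat]? := by
      funext k
      simp only [Function.comp]
      congr 1
      push_cast
      omega
    rw [hfun, ih (by omega), hget]
    have ht : List.take (n+1) xs = List.take n xs ++ [xs[n]'(by omega)] := by
      rw [List.take_add_one, List.getElem?_eq_getElem (show n < xs.length by omega)]
      simp
    rw [ht, List.reverse_append]
    simp

-- xs[::-1] = xs.reverse
theorem slice_all_rev {α : Type} (xs : List α) :
    PySem.List.slice? xs none none (-1) = some xs.reverse := by
  simp only [PySem.List.slice?, PySem.List.sliceIndices]
  norm_num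
  rcases Nat.eq_zero_or_pos xs.length with h | h
  · simp [List.eq_nil_of_length_eq_zero h]
  · rw [if_pos h, fm_rev xs xs.length le_rfl, List.take_length]

-- xs[-2::-1] = xs.dropLast.reverse
theorem slice_neg2_rev {α : Type} (xs : List α) :
    PySem.List.slice? xs (some (-2)) none (-1) = some xs.dropLast.reverse := by
  simp only [PySem.List.slice?, PySem.List.sliceIndices]
  norm_num
  rcases lt_or_ge 1 xs.length with h | h
  · rw [if_pos h]
    have hc : (max (-2 + (xs.length:Int)) (-1) + 1).toNat = xs.length - 1 := by omega
    have hf : (fun x : Nat => xs[(max (-2 + (xs.length:Int)) (-1) + -(x:Int)).toNat]?)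
        = fun x : Nat => xs[(((xs.length - 1 : Nat):Int) - 1 + -(x:Int)).toNat]? := by
      funext x
      congr 1
      omega
    rw [hc, hf, fm_rev xs (xs.length - 1) (by omega), List.dropLast_eq_take]
  · rw [if_neg (by omega)]
    interval_cases hl : xs.length
    · simp [List.eq_nil_of_length_eq_zero hl]
    · rcases xs with _ | ⟨a, _ | _⟩ <;> simp_all

theorem go_ne_nil (sep : List Char) : ∀ (fuel : Nat) (l cur : List Char) (acc : List (List Char)),
    PySem.Chars.splitOn.go sep fuel l cur acc ≠ [] := by
  intro fuel
  induction fuel with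
  | zero => intro l cur acc; rw [PySem.Chars.splitOn.go.eq_def]; simp
  | succ n ih =>
    intro l cur acc
    rw [PySem.Chars.splitOn.go.eq_def]
    match l with
    | [] => simp
    | c :: rest =>
      simp only []
      split
      · exact ih _ _ _
      · exact ih _ _ _

theorem splitOn_ne_nil (s sep : List Char) : PySem.Chars.splitOn s sep ≠ [] :=
  go_ne_nil sep _ s [] []

theorem flatMap_sp_ne_nil (ws : List (List Char)) (h : ws ≠ []) :
    ws.flatMap (fun w => w.reverse ++ [' ']) ≠ [] := by
  rcases ws with _ | ⟨w, rest⟩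
  · exact absurd rfl h
  · simp

theorem inter_append_singleton (sep : List Char) :
    ∀ (l : List (List Char)), l ≠ [] → ∀ w,
      List.intercalate sep (l ++ [w]) = List.intercalate sep l ++ sep ++ w := by
  intro l
  induction l with
  | nil => intro h; exact absurd rfl h
  | cons a t ih =>
    intro _ w
    rcases t with _ | ⟨b, t'⟩
    · simp [List.intercalate, List.intersperse]
    · have := ih (by simp) w
      simp only [List.cons_append, List.intercalate, List.intersperse] at this ⊢
      simp_all

-- the heart of the equivalence: dropping A's trailing space and reversing its
-- accumulated string is exactly B's join of the reversed token list
theorem main_join : ∀ (ws : List (List Char)), ws ≠ [] →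
    (ws.flatMap (fun w => w.reverse ++ [' '])).dropLast.reverse
      = PySem.Chars.join [' '] ws.reverse := by
  intro ws
  induction ws with
  | nil => intro h; exact absurd rfl h
  | cons w t ih =>
    intro _
    rcases t with _ | ⟨b, t'⟩
    · simp [PySem.Chars.join, List.intercalate]
    · have hne : (b :: t').flatMap (fun w => w.reverse ++ [' ']) ≠ [] :=
        flatMap_sp_ne_nil _ (by simp)
      rw [List.flatMap_cons, List.dropLast_append_of_ne_nil hne, List.reverse_append,
        ih (by simp)]
      rw [show (w :: b :: t').reverse = (b :: t').reverse ++ [w] by simp]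
      rw [PySem.Chars.join, PySem.Chars.join,
        inter_append_singleton [' '] (b :: t').reverse (by simp) w]
      simp

-- A's loop body, with both branches collapsed (reverse [] = []) and slice? resolved
theorem fold_eq_flatMap (ws : List (List Char)) :
    ws.foldl (fun tmp i =>
      if 0 < i.length then
        tmp ++ (PySem.List.slice? i none none (-1)).getD [] ++ [' ']
      else
        tmp ++ [' ']) []
      = ws.flatMap (fun w => w.reverse ++ [' ']) := by
  have hfun : (fun (tmp : List Char) (i : List Char) =>
      if 0 < i.length then
        tmp ++ (PySem.List.slice? i none none (-1)).getD [] ++ [' ']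
      else
        tmp ++ [' '])
      = fun tmp i => tmp ++ (i.reverse ++ [' ']) := by
    funext tmp i
    rcases Nat.eq_zero_or_pos i.length with h | h
    · rw [if_neg (by omega), List.eq_nil_of_length_eq_zero h]
      simp
    · rw [if_pos h, slice_all_rev]
      simp
  rw [hfun, PySem.List.foldl_append_eq_flatMap]
  simp

-- ===== VERDICT (by name: the statement is the Claim_ definition above) =====
theorem revert_spec : Claim_equal_revert := by
  intro s _
  unfold Spec_revert revert revert_alt
  simp only []
  rw [fold_eq_flatMap, slice_neg2_rev]
  rw [Option.getD_some]
  rw [main_join _ (splitOn_ne_nil s.toList [' '])]
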